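-- pv_equiv track=rewrite | github.com/Purpurum/PiTrainCo-Sum | backend/modules/data_processing.py | is_valid_old
-- ===== SOURCE A (Python) =====
-- def is_valid_old(result):
--     if not result:
--         return 0
--
--     cont_sum = 0
--     control_num = -1
--
--     if len(result) == 8:
--         control_num = int(result[-1:])
--         cont_sum = 0
--         for i in range(7):
--             num = int(result[i]) * (2, 1)[i % 2 == 1]
--             if num >= 10:
--                 cont_sum += sum(list(map(int, set(str(num)))))
--             else:
--                 cont_sum += num
--     result = int((cont_sum % 10 == 0 and control_num == 0) or (10 - cont_sum % 10) == control_num)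
--     if result == 0:
--         return False
--     else:
--         return True
-- ===== SOURCE B (Python) =====
-- _T = (0, 2, 4, 6, 8, 1, 3, 5, 7, 9)  # Luhn contribution of a doubled digit
--
-- def _luhn7(ds):
--     # consumes the digit list two at a time: a doubled position, then a plain one
--     if not ds:
--         return 0
--     if len(ds) == 1:
--         return _T[ds[0]]
--     return _T[ds[0]] + ds[1] + _luhn7(ds[2:])
--
-- def is_valid_old(result):
--     if not result:
--         return 0
--     if len(result) != 8:
--         return False
--     digits = [int(c) for c in result]
--     return (_luhn7(digits[:7]) + digits[7]) % 10 == 0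
-- ===== Notes on version B (the rewrite author's own statement) =====
-- stated objective: simpler
-- what changed: B drops A's indexed range(7) loop with parity test and per-digit str/set/map/sum machinery; it parses the code into a digit list in one pass and folds the first seven digits with a recursive helper that consumes them pairwise (table entry for the doubled position, the digit itself for the plain one), then tests (checksum + check digit) % 10 == 0 instead of A's two-clause comparison against a control number.
-- outside the precondition, e.g. on is_valid_old(''): A returns 0, B returns 0
import Mathlib
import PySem

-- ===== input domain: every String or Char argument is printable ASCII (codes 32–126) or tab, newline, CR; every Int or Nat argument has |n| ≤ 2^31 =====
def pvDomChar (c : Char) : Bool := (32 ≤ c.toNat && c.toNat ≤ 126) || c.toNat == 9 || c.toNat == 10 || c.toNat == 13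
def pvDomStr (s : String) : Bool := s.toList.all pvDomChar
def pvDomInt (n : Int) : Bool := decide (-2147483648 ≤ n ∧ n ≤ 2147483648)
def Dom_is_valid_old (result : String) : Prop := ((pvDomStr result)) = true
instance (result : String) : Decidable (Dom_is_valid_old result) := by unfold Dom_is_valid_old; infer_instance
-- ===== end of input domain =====

-- B replaces A's indexed parity loop and doubled-digit str/set/sum machinery by a one-pass
-- digit parse and a pairwise recursion over the seven leading digits with a Luhn table,
-- testing (checksum + check digit) % 10 == 0 (objective: simpler).

-- int(c) for a one-character string; under Pre_ the character is a digit so the parse succeeds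
def pyIntC (c : Char) : Int := (PySem.Int.ofChars? [c]).getD 0

-- ===== PORT A =====
def is_valid_old (result : String) : Bool :=
  if result.toList = [] then false
  else
    let cs := result.toList
    let p : Int × Int :=
      if cs.length = 8 then
        -- control_num = int(result[-1:]); cont_sum accumulated over range(7)
        let control_num := (PySem.Int.ofChars? (PySem.List.slice cs (some (-1)) none)).getD 0
        let cont_sum := (PySem.List.pyRange 0 7 1).foldl (fun acc i =>
          let num := pyIntC (PySem.List.pyGetD cs i ' ') *
                       (if PySem.Int.mod i 2 = 1 then 1 else 2)
          if 10 ≤ num then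
            acc + ((PySem.Set.ofList (PySem.Int.toChars num)).map pyIntC).sum
          else acc + num) 0
        (cont_sum, control_num)
      else (0, -1)
    let r : Int :=
      if (PySem.Int.mod p.1 10 = 0 ∧ p.2 = 0) ∨ (10 - PySem.Int.mod p.1 10) = p.2 then 1 else 0
    if r = 0 then false else true

-- ===== PORT B =====
def luhnT : List Int := [0, 2, 4, 6, 8, 1, 3, 5, 7, 9]

-- _luhn7: consumes the digit list two at a time (doubled position, then plain position)
def luhn7 : List Int → Int
  | [] => 0
  | [d] => PySem.List.pyGetD luhnT d 0
  | d0 :: d1 :: rest => PySem.List.pyGetD luhnT d0 0 + d1 + luhn7 rest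

def is_valid_old_alt (result : String) : Bool :=
  if result.toList = [] then false
  else if result.toList.length ≠ 8 then false
  else
    let digits := result.toList.map pyIntC
    decide (PySem.Int.mod (luhn7 (PySem.List.slice digits none (some 7)) +
                           PySem.List.pyGetD digits 7 0) 10 = 0)

-- ===== PRECONDITION & SPEC =====
-- Pre_ excludes the length-8 inputs containing a non-digit character, on which A's int()
-- raises ValueError (B raises there too), and the empty string, on which A returns the
-- integer 0 rather than a bool (B returns 0 there as well).
def Pre_is_valid_old (result : String) : Prop :=
  result.toList ≠ [] ∧ (result.toList.length = 8 → result.toList.all Char.isDigit = true)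
instance (result : String) : Decidable (Pre_is_valid_old result) := by
  unfold Pre_is_valid_old; infer_instance

def pvWitness_is_valid_old : String := "12345678"

def Spec_is_valid_old (result : String) (out : Bool) : Prop := out = is_valid_old_alt result
instance (result : String) (out : Bool) : Decidable (Spec_is_valid_old result out) := by
  unfold Spec_is_valid_old; infer_instance

-- ===== CLAIM (what is proved, stated in full; the proofs are below) =====
def Claim_equal_is_valid_old : Prop :=
  ∀ (result : String), Dom_is_valid_old result → Pre_is_valid_old result →
    Spec_is_valid_old result (is_valid_old result)

-- ===== LEMMAS AND PROOFS =====

theorem digit_mem (c : Char) (h : c.isDigit = true) :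
    c ∈ ['0','1','2','3','4','5','6','7','8','9'] := by
  unfold Char.isDigit at h
  rw [Bool.and_eq_true, decide_eq_true_eq, decide_eq_true_eq] at h
  have ha : 48 ≤ c.toNat := UInt32.le_iff_toNat_le.mp h.1
  have hb : c.toNat ≤ 57 := UInt32.le_iff_toNat_le.mp h.2
  have hofn : Char.ofNat c.toNat = c := Char.ofNat_toNat c
  interval_cases hc : c.toNat <;> (rw [← hofn]; decide)

theorem eight_chars (l : List Char) (h : l.length = 8) :
    ∃ a b c d e f g k, l = [a, b, c, d, e, f, g, k] := by
  rcases l with _ | ⟨a, _ | ⟨b, _ | ⟨c, _ | ⟨d, _ | ⟨e, _ | ⟨f, _ | ⟨g, _ | ⟨k, _ | ⟨x, t⟩⟩⟩⟩⟩⟩⟩⟩⟩ <;> first | exact ⟨_, _, _, _, _, _, _, _, rfl⟩ | simp_all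

theorem mod2 (a : Int) : PySem.Int.mod a 2 = a % 2 := PySem.Int.mod_eq_emod_of_pos (by norm_num)
theorem mod10 (a : Int) : PySem.Int.mod a 10 = a % 10 := PySem.Int.mod_eq_emod_of_pos (by norm_num)

theorem if_add (c : Prop) [Decidable c] (a x y : Int) :
    (if c then a + x else a + y) = a + (if c then x else y) := by split_ifs <;> rfl

-- A's contribution of a doubled digit (even position) equals B's table lookup
theorem stepA_even (c : Char) (h : c ∈ ['0','1','2','3','4','5','6','7','8','9']) :
    (if 10 ≤ pyIntC c * 2 then
        ((PySem.Set.ofList (PySem.Int.toChars (pyIntC c * 2))).map pyIntC).sum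
      else pyIntC c * 2)
      = (PySem.List.pyGet? luhnT (pyIntC c)).getD 0 := by
  fin_cases h <;> decide

-- at an odd position the digit itself is below 10, so A's branch collapses
theorem stepA_odd (c : Char) (h : c ∈ ['0','1','2','3','4','5','6','7','8','9']) :
    (if 10 ≤ pyIntC c then
        ((PySem.Set.ofList (PySem.Int.toChars (pyIntC c))).map pyIntC).sum
      else pyIntC c)
      = pyIntC c := by
  fin_cases h <;> decide

theorem dv_bounds (c : Char) (h : c ∈ ['0','1','2','3','4','5','6','7','8','9']) :
    0 ≤ pyIntC c ∧ pyIntC c ≤ 9 := by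
  fin_cases h <;> decide

-- ===== VERDICT (by name: the statement is the Claim_ definition above) =====
theorem is_valid_old_spec : Claim_equal_is_valid_old := by
  intro result _ hpre
  obtain ⟨h0, hpre⟩ := hpre
  unfold Spec_is_valid_old
  by_cases h8 : result.toList.length = 8
  · obtain ⟨c0, c1, c2, c3, c4, c5, c6, c7, hl⟩ := eight_chars _ h8
    have hall := hpre h8
    rw [hl] at hall
    simp only [List.all_cons, List.all_nil, Bool.and_eq_true, and_true] at hall
    obtain ⟨d0, d1, d2, d3, d4, d5, d6, d7⟩ := hall
    have m0 := digit_mem _ d0; have m1 := digit_mem _ d1; have m2 := digit_mem _ d2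
    have m3 := digit_mem _ d3; have m4 := digit_mem _ d4; have m5 := digit_mem _ d5
    have m6 := digit_mem _ d6; have m7 := digit_mem _ d7
    have hrange : PySem.List.pyRange 0 7 1 = [0, 1, 2, 3, 4, 5, 6] := by decide
    simp only [is_valid_old, is_valid_old_alt, hl, hrange, mod2, mod10]
    simp [PySem.List.slice, PySem.List.clampIdx, PySem.List.pyGetD, luhn7, List.foldl]
    simp only [if_add]
    rw [stepA_even c0 m0, stepA_odd c1 m1, stepA_even c2 m2, stepA_odd c3 m3,
        stepA_even c4 m4, stepA_odd c5 m5, stepA_even c6 m6]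
    rw [Bool.eq_iff_iff]
    simp only [decide_eq_true_eq, Bool.or_eq_true, Bool.and_eq_true]
    have e7 : (PySem.Int.ofChars? [c7]).getD 0 = pyIntC c7 := rfl
    rw [e7]
    have b7 := dv_bounds c7 m7
    generalize (PySem.List.pyGet? luhnT (pyIntC c0)).getD 0 = t0
    generalize pyIntC c1 = g1
    generalize (PySem.List.pyGet? luhnT (pyIntC c2)).getD 0 = t2
    generalize pyIntC c3 = g3
    generalize (PySem.List.pyGet? luhnT (pyIntC c4)).getD 0 = t4
    generalize pyIntC c5 = g5
    generalize (PySem.List.pyGet? luhnT (pyIntC c6)).getD 0 = t6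
    generalize pyIntC c7 = g7 at b7 ⊢
    omega
  · have hL : ¬ result.length = 8 := by
      intro h; apply h8; simpa using h
    simp [is_valid_old, is_valid_old_alt, h0, hL]
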